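-- pv_equiv track=rewrite | github.com/Shlok-Dwivedi/LeetCode | 3750-minimum-number-of-flips-to-reverse-binary-string/3750-minimum-number-of-flips-to-reverse-binary-string.py | minimumFlips
-- ===== SOURCE A (Python) =====
-- def minimumFlips(n: int) -> int:
--     binary = ""
--
--     while n != 0:
--         r = n % 2
--         binary = str(r) + binary   # build correctly
--         n //= 2
--
--     rev = binary[::-1]
--
--     flips = 0
--     for i in range(len(binary)):
--         if binary[i] != rev[i]:
--             flips += 1
--
--     return flips
-- ===== SOURCE B (Python) =====
-- def minimumFlips(n: int) -> int:
--     m = n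
--     rev = 0
--     while m != 0:
--         rev = rev * 2 + m % 2
--         m //= 2
--
--     flips = 0
--     a, b = n, rev
--     while a != 0 or b != 0:
--         if a % 2 != b % 2:
--             flips += 1
--         a //= 2
--         b //= 2
--     return flips
-- ===== Notes on version B (the rewrite author's own statement) =====
-- stated objective: alternative
-- what changed: Replaces the binary-string construction, slice reversal and indexed symmetric comparison with pure integer arithmetic: a first loop builds the bit-reversed integer rev, and a second loop counts positions where the low bits of n and rev differ.
import Mathlib
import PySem

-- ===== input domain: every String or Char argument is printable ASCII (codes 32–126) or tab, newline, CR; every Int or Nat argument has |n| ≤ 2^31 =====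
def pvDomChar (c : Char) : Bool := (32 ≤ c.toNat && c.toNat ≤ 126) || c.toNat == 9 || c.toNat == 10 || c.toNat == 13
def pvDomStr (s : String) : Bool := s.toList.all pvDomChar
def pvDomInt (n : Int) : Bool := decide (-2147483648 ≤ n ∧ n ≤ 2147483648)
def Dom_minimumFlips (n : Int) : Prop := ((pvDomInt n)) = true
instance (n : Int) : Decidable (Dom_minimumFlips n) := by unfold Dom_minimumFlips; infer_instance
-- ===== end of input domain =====

-- B replaces A's binary-string building and indexed symmetric comparison by two integer loops
-- (build the bit-reversed integer, then count differing low bits); alternative, no speed claim.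

-- ===== PORT A =====
-- The Python string is modelled as List Char (exact: only the chars of str(0)/str(1) occur).
-- A's loop condition is `n != 0`; on n < 0 the Python loop never terminates (n//2 stays -1),
-- so those inputs are excluded by Pre_ below. The Nat `fuel` (n.toNat iterations suffice, as
-- n at least halves each step) is only a totality guard; the loop body is A's.
def buildBinary (fuel : Nat) (n : Int) (binary : List Char) : List Char :=
  match fuel with
  | 0 => binary
  | fuel + 1 =>
    if 0 < n then
      buildBinary fuel (PySem.Int.floordiv n 2)
        ((PySem.Int.toStr (PySem.Int.mod n 2)).toList ++ binary)
    else binary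

def minimumFlips (n : Int) : Int :=
  let binary := buildBinary n.toNat n []
  let rev := binary.reverse          -- binary[::-1]
  (PySem.List.pyRange 0 binary.length 1).foldl
    (fun flips i =>
      if PySem.List.pyGetD binary i ' ' ≠ PySem.List.pyGetD rev i ' ' then flips + 1 else flips) 0

-- ===== PORT B =====
-- `while m != 0` loops of Source B; the guard 0 < m matches on Pre_ (Python diverges on negatives,
-- excluded by Pre_), and fuel is again only a totality guard.
def revLoop (fuel : Nat) (m rev : Int) : Int :=
  match fuel with
  | 0 => rev
  | fuel + 1 =>
    if 0 < m then revLoop fuel (PySem.Int.floordiv m 2) (rev * 2 + PySem.Int.mod m 2) else rev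

def mismLoop (fuel : Nat) (a b flips : Int) : Int :=
  match fuel with
  | 0 => flips
  | fuel + 1 =>
    if 0 < a ∨ 0 < b then
      mismLoop fuel (PySem.Int.floordiv a 2) (PySem.Int.floordiv b 2)
        (if PySem.Int.mod a 2 ≠ PySem.Int.mod b 2 then flips + 1 else flips)
    else flips

def minimumFlips_alt (n : Int) : Int :=
  let rev := revLoop n.toNat n 0
  mismLoop (n.toNat + rev.toNat) n rev 0

-- ===== PRECONDITION & SPEC =====
-- Pre_ excludes n < 0, on which A's while-loop never terminates (n//2 stays -1): A returns no value there.
def Pre_minimumFlips (n : Int) : Prop := 0 ≤ n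
instance (n : Int) : Decidable (Pre_minimumFlips n) := by unfold Pre_minimumFlips; infer_instance
def pvWitness_minimumFlips : Int := 6

def Spec_minimumFlips (n : Int) (out : Int) : Prop := out = minimumFlips_alt n
instance (n : Int) (out : Int) : Decidable (Spec_minimumFlips n out) := by unfold Spec_minimumFlips; infer_instance

-- ===== CLAIM (what is proved, stated in full; the proofs are below) =====
def Claim_equal_minimumFlips : Prop :=
  ∀ (n : Int), Dom_minimumFlips n → Pre_minimumFlips n → Spec_minimumFlips n (minimumFlips n)

-- ===== LEMMAS AND PROOFS =====

-- LSB-first bit list of n (proof-only helper)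
def bitsOf (n : Int) : List Int :=
  if h : 0 < n then PySem.Int.mod n 2 :: bitsOf (PySem.Int.floordiv n 2) else []
termination_by n.toNat
decreasing_by
  rw [PySem.Int.floordiv_eq_ediv_of_pos (by omega)]
  omega

-- value of an LSB-first bit list
def valL : List Int → Int
  | [] => 0
  | b :: t => b + 2 * valL t

lemma valL_nil : valL [] = 0 := rfl
lemma valL_cons (b : Int) (t : List Int) : valL (b :: t) = b + 2 * valL t := rfl

def IsBits (L : List Int) : Prop := ∀ b ∈ L, b = 0 ∨ b = 1

lemma bitsOf_isBits (n : Int) : IsBits (bitsOf n) := by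
  rw [bitsOf]
  split
  · rename_i h
    intro b hb
    rcases List.mem_cons.mp hb with rfl | hb
    · have h1 := PySem.Int.mod_nonneg n (b := 2) (by omega)
      have h2 := PySem.Int.mod_lt n (b := 2) (by omega)
      omega
    · exact bitsOf_isBits _ b hb
  · intro b hb; simp at hb
termination_by n.toNat
decreasing_by
  rw [PySem.Int.floordiv_eq_ediv_of_pos (by omega)]
  omega

lemma valL_bitsOf (n : Int) (hn : 0 ≤ n) : valL (bitsOf n) = n := by
  rw [bitsOf]
  split
  · rename_i h
    rw [valL_cons, valL_bitsOf _ (by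
      rw [PySem.Int.floordiv_eq_ediv_of_pos (by omega)]; omega)]
    have := PySem.Int.floordiv_mul_add_mod n 2
    omega
  · rename_i h
    simp only [valL_nil]; omega
termination_by n.toNat
decreasing_by
  rw [PySem.Int.floordiv_eq_ediv_of_pos (by omega)]
  omega

lemma valL_nonneg {L : List Int} (hL : IsBits L) : 0 ≤ valL L := by
  induction L with
  | nil => simp [valL_nil]
  | cons b t ih =>
    have hb := hL b (by simp)
    have ht : IsBits t := fun x hx => hL x (by simp [hx])
    have := ih ht
    rw [valL_cons]; omega

lemma valL_eq_zero {L : List Int} (hL : IsBits L) (h : valL L = 0) : ∀ b ∈ L, b = 0 := by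
  induction L with
  | nil => simp
  | cons b t ih =>
    have hb := hL b (by simp)
    have ht : IsBits t := fun x hx => hL x (by simp [hx])
    have htn := valL_nonneg ht
    rw [valL_cons] at h
    intro x hx
    rcases List.mem_cons.mp hx with rfl | hx
    · omega
    · exact ih ht (by omega) x hx

-- A's string-building loop produces the reversed (MSB-first) digit list (fuel ≥ n.toNat suffices)
lemma buildBinary_eq (fuel : Nat) (n : Int) (acc : List Char) (hf : n.toNat ≤ fuel) :
    buildBinary fuel n acc
      = ((bitsOf n).map (fun b => if b = 0 then '0' else '1')).reverse ++ acc := by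
  induction fuel generalizing n acc with
  | zero =>
    have hn : ¬ 0 < n := by omega
    rw [buildBinary, bitsOf]
    simp [hn]
  | succ fuel ih =>
    rw [buildBinary, bitsOf]
    split
    · rename_i h
      have h1 := PySem.Int.mod_nonneg n (b := 2) (by omega)
      have h2 := PySem.Int.mod_lt n (b := 2) (by omega)
      rw [ih _ _ (by rw [PySem.Int.floordiv_eq_ediv_of_pos (by omega)]; omega)]
      have : (PySem.Int.toStr (PySem.Int.mod n 2)).toList
          = [if PySem.Int.mod n 2 = 0 then '0' else '1'] := by
        interval_cases h : (PySem.Int.mod n 2) <;> decide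
      rw [this]
      simp
    · simp

-- A's indexed comparison loop is the mismatch count of the zipped lists
lemma foldl_range_getD (xs ys : List Char) (h : xs.length = ys.length) (flips : Int) :
    (List.range xs.length).foldl
      (fun f k => if xs.getD k ' ' ≠ ys.getD k ' ' then f + 1 else f) flips
    = flips + ((xs.zip ys).countP (fun p => p.1 != p.2) : Int) := by
  induction xs generalizing ys flips with
  | nil => simp
  | cons x xs ih =>
    cases ys with
    | nil => simp at h
    | cons y ys =>
      simp only [List.length_cons, List.range_succ_eq_map, List.foldl_cons, List.foldl_map,
        List.getD_cons_zero, List.getD_cons_succ, List.zip_cons_cons, List.countP_cons]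
      rw [ih ys (by simpa using h)]
      by_cases hxy : x = y <;> simp [hxy] <;> push_cast <;> ring

lemma countP_zip_map_bits {A B : List Int} (hA : IsBits A) (hB : IsBits B) :
    ((A.map (fun b => if b = 0 then '0' else '1')).zip
      (B.map (fun b => if b = 0 then '0' else '1'))).countP (fun p => p.1 != p.2)
    = (A.zip B).countP (fun p => p.1 != p.2) := by
  rw [List.zip_map, List.countP_map]
  apply List.countP_congr
  intro p hp
  have h1 := hA p.1 (List.of_mem_zip hp).1
  have h2 := hB p.2 (List.of_mem_zip hp).2
  rcases h1 with h1 | h1 <;> rcases h2 with h2 | h2 <;>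
    simp [Prod.map, h1, h2]

lemma countP_zip_swap (A B : List Int) :
    (A.zip B).countP (fun p => p.1 != p.2) = (B.zip A).countP (fun p => p.1 != p.2) := by
  rw [← List.zip_swap A B, List.countP_map]
  apply List.countP_congr
  intro p _
  simp [bne, BEq.comm]

-- B's first loop computes the value of the reversed bit list (fuel ≥ n.toNat suffices)
lemma revLoop_eq (fuel : Nat) (n : Int) (acc : Int) (hf : n.toNat ≤ fuel) :
    revLoop fuel n acc = (bitsOf n).foldl (fun a b => a * 2 + b) acc := by
  induction fuel generalizing n acc with
  | zero =>
    have hn : ¬ 0 < n := by omega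
    rw [revLoop, bitsOf]
    simp [hn]
  | succ fuel ih =>
    rw [revLoop, bitsOf]
    split
    · rename_i h
      rw [ih _ _ (by rw [PySem.Int.floordiv_eq_ediv_of_pos (by omega)]; omega)]
      simp
    · simp

lemma foldl_val_rev (L : List Int) (acc : Int) :
    L.foldl (fun a b => a * 2 + b) acc = valL L.reverse + acc * 2 ^ L.length := by
  induction L generalizing acc with
  | nil => simp [valL_nil]
  | cons b t ih =>
    simp only [List.foldl_cons, List.reverse_cons, List.length_cons]
    rw [ih]
    have : valL (t.reverse ++ [b]) = valL t.reverse + b * 2 ^ t.reverse.length := by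
      clear ih
      induction t.reverse with
      | nil => simp [valL_nil, valL_cons]
      | cons c s ih2 =>
        simp only [List.cons_append, valL_cons, List.length_cons, ih2]
        ring
    rw [this]
    simp only [List.length_reverse]
    ring

-- arithmetic step facts for a bit cons
lemma mod_two_cons {b : Int} (v : Int) (hb : b = 0 ∨ b = 1) (hv : 0 ≤ v) :
    PySem.Int.mod (b + 2 * v) 2 = b := by
  rw [PySem.Int.mod_eq_emod_of_pos (by omega)]
  omega

lemma floordiv_two_cons {b : Int} (v : Int) (hb : b = 0 ∨ b = 1) :
    PySem.Int.floordiv (b + 2 * v) 2 = v := by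
  rw [PySem.Int.floordiv_eq_ediv_of_pos (by omega)]
  omega

lemma countP_zip_zero {L M : List Int} (hL : IsBits L) (hM : IsBits M)
    (hvL : valL L = 0) (hvM : valL M = 0) :
    (L.zip M).countP (fun p => p.1 != p.2) = 0 := by
  rw [List.countP_eq_zero]
  intro p hp
  have h1 := valL_eq_zero hL hvL p.1 (List.of_mem_zip hp).1
  have h2 := valL_eq_zero hM hvM p.2 (List.of_mem_zip hp).2
  simp [h1, h2]

-- B's second loop counts zipped mismatches of equal-length bit lists
-- (fuel ≥ (valL L).toNat + (valL M).toNat suffices)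
lemma mismLoop_eq (fuel : Nat) (L M : List Int) (hL : IsBits L) (hM : IsBits M)
    (h : L.length = M.length) (flips : Int)
    (hf : (valL L).toNat + (valL M).toNat ≤ fuel) :
    mismLoop fuel (valL L) (valL M) flips
      = flips + ((L.zip M).countP (fun p => p.1 != p.2) : Int) := by
  induction fuel generalizing L M flips with
  | zero =>
    have hvL := valL_nonneg hL
    have hvM := valL_nonneg hM
    rw [mismLoop, countP_zip_zero hL hM (by omega) (by omega)]
    simp
  | succ fuel ih =>
    rw [mismLoop]
    split
    · rename_i hcond
      cases L with
      | nil =>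
        cases M with
        | nil => simp [valL_nil] at hcond
        | cons c M => simp at h
      | cons b L =>
        cases M with
        | nil => simp at h
        | cons c M =>
          have hb := hL b (by simp)
          have hc := hM c (by simp)
          have hL' : IsBits L := fun x hx => hL x (by simp [hx])
          have hM' : IsBits M := fun x hx => hM x (by simp [hx])
          have hvL := valL_nonneg hL'
          have hvM := valL_nonneg hM'
          rw [valL_cons, valL_cons, mod_two_cons _ hb hvL, mod_two_cons _ hc hvM,
              floordiv_two_cons _ hb, floordiv_two_cons _ hc]
          rw [ih L M hL' hM' (by simpa using h) _ (by
            rw [valL_cons, valL_cons] at hcond hf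
            omega)]
          simp only [List.zip_cons_cons, List.countP_cons]
          by_cases hbc : b = c <;> simp [hbc] <;> push_cast <;> ring
    · rename_i hcond
      push_neg at hcond
      have hvL := valL_nonneg hL
      have hvM := valL_nonneg hM
      rw [countP_zip_zero hL hM (by omega) (by omega)]
      simp

-- bridge: A's pyRange/pyGetD fold equals the getD/range fold
lemma foldl_pyRange_eq (xs ys : List Char) (flips : Int) :
    (PySem.List.pyRange 0 (xs.length : Int) 1).foldl
      (fun f i => if PySem.List.pyGetD xs i ' ' ≠ PySem.List.pyGetD ys i ' ' then f + 1 else f) flips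
    = (List.range xs.length).foldl
      (fun f k => if xs.getD k ' ' ≠ ys.getD k ' ' then f + 1 else f) flips := by
  rw [PySem.List.pyRange_zero_nat, List.foldl_map]
  apply PySem.List.foldl_congr_mem
  intro acc k hk
  simp [PySem.List.pyGetD_natCast]

-- ===== VERDICT (by name: the statement is the Claim_ definition above) =====
theorem minimumFlips_spec : Claim_equal_minimumFlips := by
  intro n _ hpre
  unfold Spec_minimumFlips minimumFlips minimumFlips_alt
  simp only []
  set L := bitsOf n with hLdef
  have hLbits := bitsOf_isBits n
  have hLbitsR : IsBits L.reverse := fun x hx => hLbits x (List.mem_reverse.mp hx)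
  have hval : valL L = n := valL_bitsOf n hpre
  -- A side
  rw [buildBinary_eq n.toNat n [] (le_refl _)]
  set R := L.map (fun b => if b = 0 then '0' else '1') with hR
  rw [List.append_nil]
  rw [show (R.reverse.length : Int) = ((R.reverse.length : Nat) : Int) from rfl]
  rw [foldl_pyRange_eq R.reverse R.reverse.reverse]
  rw [foldl_range_getD R.reverse R.reverse.reverse (by simp)]
  -- B side
  rw [revLoop_eq n.toNat n 0 (le_refl _), foldl_val_rev]
  simp only [zero_mul, add_zero]
  have hB : mismLoop (n.toNat + (valL L.reverse).toNat) n (valL L.reverse) 0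
      = 0 + ((L.zip L.reverse).countP (fun p => p.1 != p.2) : Int) := by
    have hm := mismLoop_eq (n.toNat + (valL L.reverse).toNat) L L.reverse hLbits hLbitsR
      (by simp) 0 (by rw [hval])
    rwa [hval] at hm
  rw [hB]
  -- both are mismatch counts of zipped bit lists
  rw [List.reverse_reverse]
  rw [show R.reverse = L.reverse.map (fun b => if b = 0 then '0' else '1') by
    simp [hR, List.map_reverse]]
  rw [countP_zip_map_bits hLbitsR hLbits, countP_zip_swap]
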